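-- pv_equiv track=rewrite | github.com/ShotaYmzk/mahjong-transformer-xai | utils/shanten.py | format_tiles_for_display
-- ===== SOURCE A (Python) =====
-- def format_tiles_for_display(tile_indices):
--     """
--     牌のインデックスのリストを表示用の文字列に変換します。
--     """
--     if not tile_indices:
--         return ""
--
--     man = sorted([i for i in tile_indices if 0 <= i <= 8])
--     pin = sorted([i for i in tile_indices if 9 <= i <= 17])
--     sou = sorted([i for i in tile_indices if 18 <= i <= 26])
--     honors = sorted([i for i in tile_indices if 27 <= i <= 33])
--
--     result_str = ""
--     if man:
--         # 赤5萬は0mと表示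
--         result_str += "".join(['0' if t == 4 else str(t + 1) for t in man]) + "m"
--     if pin:
--         # 赤5筒は0pと表示
--         result_str += "".join(['0' if t == 13 else str(t - 9 + 1) for t in pin]) + "p"
--     if sou:
--         # 赤5索は0sと表示
--         result_str += "".join(['0' if t == 22 else str(t - 18 + 1) for t in sou]) + "s"
--     if honors:
--         result_str += "".join([str(t - 27 + 1) for t in honors]) + "z"
--
--     return result_str
-- ===== SOURCE B (Python) =====
-- def format_tiles_for_display(tile_indices):
--     """Single-pass table-driven formatter: sort once, bucket digits per suit."""
--     if not tile_indices:
--         return ""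
--     bufs = ["", "", "", ""]
--     for t in sorted(tile_indices):
--         if 0 <= t <= 33:
--             suit, within = divmod(t, 9)
--             bufs[suit] += '0' if suit < 3 and within == 4 else str(within + 1)
--     return "".join(b + sfx for b, sfx in zip(bufs, "mpsz") if b)
-- ===== Notes on version B (the rewrite author's own statement) =====
-- stated objective: alternative
-- what changed: Replaces A's four per-suit filter+sort+branch blocks by one sort of the whole list followed by a single divmod-driven bucketing pass that appends each digit to its suit buffer, then joins the non-empty buffers with their suffixes.
import Mathlib
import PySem

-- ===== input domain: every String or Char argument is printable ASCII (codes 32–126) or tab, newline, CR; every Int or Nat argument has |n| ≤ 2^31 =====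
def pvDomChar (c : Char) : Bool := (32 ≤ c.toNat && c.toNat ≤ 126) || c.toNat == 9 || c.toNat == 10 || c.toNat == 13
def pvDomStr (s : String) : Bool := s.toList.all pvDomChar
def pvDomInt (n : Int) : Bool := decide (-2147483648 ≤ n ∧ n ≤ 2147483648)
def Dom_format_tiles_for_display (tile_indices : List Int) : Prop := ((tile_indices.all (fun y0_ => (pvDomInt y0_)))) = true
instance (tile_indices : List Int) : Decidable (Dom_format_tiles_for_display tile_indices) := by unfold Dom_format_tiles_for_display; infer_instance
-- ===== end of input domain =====

-- B replaces A's four filter+sort+branch blocks by one sort and a single divmod-bucketing pass over it (objective: alternative decomposition, same cost).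

-- ===== PORT A =====
def format_tiles_for_display (tile_indices : List Int) : String :=
  if tile_indices = [] then "" else
  let man := PySem.List.sorted (tile_indices.filter (fun i => decide (0 ≤ i) && decide (i ≤ 8))) (fun x => x) false
  let pin := PySem.List.sorted (tile_indices.filter (fun i => decide (9 ≤ i) && decide (i ≤ 17))) (fun x => x) false
  let sou := PySem.List.sorted (tile_indices.filter (fun i => decide (18 ≤ i) && decide (i ≤ 26))) (fun x => x) false
  let honors := PySem.List.sorted (tile_indices.filter (fun i => decide (27 ≤ i) && decide (i ≤ 33))) (fun x => x) false
  let r : List Char := []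
  let r := if man ≠ [] then r ++ (man.map (fun t => if t = 4 then ['0'] else (PySem.Int.toStr (t + 1)).toList)).flatten ++ ['m'] else r
  let r := if pin ≠ [] then r ++ (pin.map (fun t => if t = 13 then ['0'] else (PySem.Int.toStr (t - 9 + 1)).toList)).flatten ++ ['p'] else r
  let r := if sou ≠ [] then r ++ (sou.map (fun t => if t = 22 then ['0'] else (PySem.Int.toStr (t - 18 + 1)).toList)).flatten ++ ['s'] else r
  let r := if honors ≠ [] then r ++ (honors.map (fun t => (PySem.Int.toStr (t - 27 + 1)).toList)).flatten ++ ['z'] else r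
  String.mk r

-- ===== PORT B =====
-- suit, within = divmod(t, 9)
def pvSuitOf (t : Int) : Int := PySem.Int.floordiv t 9
def pvWithinOf (t : Int) : Int := PySem.Int.mod t 9
-- '0' if suit < 3 and within == 4 else str(within + 1)
def pvDigit (t : Int) : List Char :=
  if pvSuitOf t < 3 ∧ pvWithinOf t = 4 then ['0'] else (PySem.Int.toStr (pvWithinOf t + 1)).toList
-- one loop iteration: bufs[suit] += digit  (suit is 0..3 whenever the branch is taken, so .toNat is Python's index)
def pvStep (bufs : List (List Char)) (t : Int) : List (List Char) :=
  if decide (0 ≤ t) && decide (t ≤ 33) then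
    bufs.set (pvSuitOf t).toNat (bufs.getD (pvSuitOf t).toNat [] ++ pvDigit t)
  else bufs
def format_tiles_for_display_alt (tile_indices : List Int) : String :=
  if tile_indices = [] then "" else
  let bufs := (PySem.List.sorted tile_indices (fun x => x) false).foldl pvStep [[], [], [], []]
  String.mk (((bufs.zip ['m', 'p', 's', 'z']).filter (fun bs => bs.1 ≠ [])).map (fun bs => bs.1 ++ [bs.2])).flatten

-- ===== PRECONDITION & SPEC =====
def Spec_format_tiles_for_display (tile_indices : List Int) (out : String) : Prop := out = format_tiles_for_display_alt tile_indices
instance (tile_indices : List Int) (out : String) : Decidable (Spec_format_tiles_for_display tile_indices out) := by unfold Spec_format_tiles_for_display; infer_instance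

-- ===== CLAIM (what is proved, stated in full; the proofs are below) =====
def Claim_equal_format_tiles_for_display : Prop := ∀ (tile_indices : List Int), Dom_format_tiles_for_display tile_indices → Spec_format_tiles_for_display tile_indices (format_tiles_for_display tile_indices)

-- ===== LEMMAS AND PROOFS =====

-- the characters B's pass contributes to buffer s while scanning ys
def pvGroup (s : Int) (ys : List Int) : List Char :=
  ((ys.filter (fun t => decide (0 ≤ t) && decide (t ≤ 33) && decide (pvSuitOf t = s))).map pvDigit).flatten

theorem pvGroup_cons_pos {t s : Int} (ys : List Int) (h0 : 0 ≤ t) (h33 : t ≤ 33) (hs : pvSuitOf t = s) :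
    pvGroup s (t :: ys) = pvDigit t ++ pvGroup s ys := by
  unfold pvGroup
  rw [List.filter_cons_of_pos (by simp [h0, h33, hs])]
  simp

theorem pvGroup_cons_neg {t s : Int} (ys : List Int) (h : ¬(0 ≤ t ∧ t ≤ 33 ∧ pvSuitOf t = s)) :
    pvGroup s (t :: ys) = pvGroup s ys := by
  unfold pvGroup
  rw [List.filter_cons_of_neg (by simp; tauto)]

theorem pvSuit_bounds {t : Int} (h0 : 0 ≤ t) (h33 : t ≤ 33) : 0 ≤ pvSuitOf t ∧ pvSuitOf t ≤ 3 := by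
  have hm1 : 0 ≤ PySem.Int.mod t 9 := PySem.Int.mod_nonneg t (by norm_num)
  have hm2 : PySem.Int.mod t 9 < 9 := PySem.Int.mod_lt t (by norm_num)
  have hd := PySem.Int.floordiv_mul_add_mod t 9
  unfold pvSuitOf; omega

theorem pvFold_inv (ys : List Int) (b0 b1 b2 b3 : List Char) :
    ys.foldl pvStep [b0, b1, b2, b3] =
      [b0 ++ pvGroup 0 ys, b1 ++ pvGroup 1 ys, b2 ++ pvGroup 2 ys, b3 ++ pvGroup 3 ys] := by
  induction ys generalizing b0 b1 b2 b3 with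
  | nil => simp [pvGroup]
  | cons t ys ih =>
    by_cases hin : 0 ≤ t ∧ t ≤ 33
    · have hb := pvSuit_bounds hin.1 hin.2
      have hs : pvSuitOf t = 0 ∨ pvSuitOf t = 1 ∨ pvSuitOf t = 2 ∨ pvSuitOf t = 3 := by omega
      rw [List.foldl_cons]
      rcases hs with h | h | h | h
      · have hstep : pvStep [b0, b1, b2, b3] t = [b0 ++ pvDigit t, b1, b2, b3] := by
          simp [pvStep, hin.1, hin.2, h]
        rw [hstep, ih, pvGroup_cons_pos ys hin.1 hin.2 h,
            pvGroup_cons_neg ys (by simp [h]), pvGroup_cons_neg ys (by simp [h]),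
            pvGroup_cons_neg ys (by simp [h])]
        simp
      · have hstep : pvStep [b0, b1, b2, b3] t = [b0, b1 ++ pvDigit t, b2, b3] := by
          simp [pvStep, hin.1, hin.2, h]
        rw [hstep, ih, pvGroup_cons_pos ys hin.1 hin.2 h,
            pvGroup_cons_neg ys (by simp [h]), pvGroup_cons_neg ys (by simp [h]),
            pvGroup_cons_neg ys (by simp [h])]
        simp
      · have hstep : pvStep [b0, b1, b2, b3] t = [b0, b1, b2 ++ pvDigit t, b3] := by
          simp [pvStep, hin.1, hin.2, h]
        rw [hstep, ih, pvGroup_cons_pos ys hin.1 hin.2 h,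
            pvGroup_cons_neg ys (by simp [h]), pvGroup_cons_neg ys (by simp [h]),
            pvGroup_cons_neg ys (by simp [h])]
        simp
      · have hstep : pvStep [b0, b1, b2, b3] t = [b0, b1, b2, b3 ++ pvDigit t] := by
          simp [pvStep, hin.1, hin.2, h]
        rw [hstep, ih, pvGroup_cons_pos ys hin.1 hin.2 h,
            pvGroup_cons_neg ys (by simp [h]), pvGroup_cons_neg ys (by simp [h]),
            pvGroup_cons_neg ys (by simp [h])]
        simp
    · have hstep : pvStep [b0, b1, b2, b3] t = [b0, b1, b2, b3] := by
        simp [pvStep]; omega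
      rw [List.foldl_cons, hstep, ih,
          pvGroup_cons_neg ys (by tauto), pvGroup_cons_neg ys (by tauto),
          pvGroup_cons_neg ys (by tauto), pvGroup_cons_neg ys (by tauto)]

-- a stable sort of a filtered list is the filtered sorted list
theorem pvSorted_filter (xs : List Int) (p : Int → Bool) :
    PySem.List.sorted (xs.filter p) (fun x => x) false
      = (PySem.List.sorted xs (fun x => x) false).filter p := by
  apply PySem.List.sorted_id_eq_of_perm_of_pairwise
  · exact (PySem.List.sorted_perm xs (fun x => x) false).filter p
  · exact (PySem.List.sorted_pairwise xs (fun x => x)).sublist List.filter_sublist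

theorem pvSuit_eq_iff {t : Int} (q : Int) : pvSuitOf t = q ↔ q * 9 ≤ t ∧ t < (q + 1) * 9 :=
  PySem.Int.floordiv_eq_iff_of_pos (by norm_num)

theorem pvWithin_eq {t s : Int} (hs : pvSuitOf t = s) : pvWithinOf t = t - s * 9 := by
  have hd := PySem.Int.floordiv_mul_add_mod t 9
  unfold pvWithinOf; unfold pvSuitOf at hs; omega

theorem pvGroup0 (ys : List Int) :
    pvGroup 0 ys = (((ys.filter (fun i => decide (0 ≤ i) && decide (i ≤ 8))).map
      (fun t => if t = 4 then ['0'] else (PySem.Int.toStr (t + 1)).toList))).flatten := by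
  have hf : ys.filter (fun t => decide (0 ≤ t) && decide (t ≤ 33) && decide (pvSuitOf t = (0:Int)))
      = ys.filter (fun i => decide (0 ≤ i) && decide (i ≤ 8)) := by
    apply List.filter_congr
    intro t _
    rw [Bool.eq_iff_iff]
    simp only [Bool.and_eq_true, decide_eq_true_eq, pvSuit_eq_iff]
    omega
  unfold pvGroup
  rw [hf]
  congr 1
  apply List.map_congr_left
  intro t ht
  simp only [List.mem_filter, Bool.and_eq_true, decide_eq_true_eq] at ht
  have hs : pvSuitOf t = 0 := by rw [pvSuit_eq_iff]; omega
  have hw : pvWithinOf t = t := by have := pvWithin_eq hs; omega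
  simp [pvDigit, hs, hw]

theorem pvGroup1 (ys : List Int) :
    pvGroup 1 ys = (((ys.filter (fun i => decide (9 ≤ i) && decide (i ≤ 17))).map
      (fun t => if t = 13 then ['0'] else (PySem.Int.toStr (t - 9 + 1)).toList))).flatten := by
  have hf : ys.filter (fun t => decide (0 ≤ t) && decide (t ≤ 33) && decide (pvSuitOf t = (1:Int)))
      = ys.filter (fun i => decide (9 ≤ i) && decide (i ≤ 17)) := by
    apply List.filter_congr
    intro t _
    rw [Bool.eq_iff_iff]
    simp only [Bool.and_eq_true, decide_eq_true_eq, pvSuit_eq_iff]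
    omega
  unfold pvGroup
  rw [hf]
  congr 1
  apply List.map_congr_left
  intro t ht
  simp only [List.mem_filter, Bool.and_eq_true, decide_eq_true_eq] at ht
  have hs : pvSuitOf t = 1 := by rw [pvSuit_eq_iff]; omega
  have hw : pvWithinOf t = t - 9 := by have := pvWithin_eq hs; omega
  by_cases h4 : t = 13
  · subst h4; decide
  · have hne : ¬(t - 9 = 4) := by omega
    simp [pvDigit, hs, hw, h4, hne]

theorem pvGroup2 (ys : List Int) :
    pvGroup 2 ys = (((ys.filter (fun i => decide (18 ≤ i) && decide (i ≤ 26))).map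
      (fun t => if t = 22 then ['0'] else (PySem.Int.toStr (t - 18 + 1)).toList))).flatten := by
  have hf : ys.filter (fun t => decide (0 ≤ t) && decide (t ≤ 33) && decide (pvSuitOf t = (2:Int)))
      = ys.filter (fun i => decide (18 ≤ i) && decide (i ≤ 26)) := by
    apply List.filter_congr
    intro t _
    rw [Bool.eq_iff_iff]
    simp only [Bool.and_eq_true, decide_eq_true_eq, pvSuit_eq_iff]
    omega
  unfold pvGroup
  rw [hf]
  congr 1
  apply List.map_congr_left
  intro t ht
  simp only [List.mem_filter, Bool.and_eq_true, decide_eq_true_eq] at ht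
  have hs : pvSuitOf t = 2 := by rw [pvSuit_eq_iff]; omega
  have hw : pvWithinOf t = t - 18 := by have := pvWithin_eq hs; omega
  by_cases h4 : t = 22
  · subst h4; decide
  · have hne : ¬(t - 18 = 4) := by omega
    simp [pvDigit, hs, hw, h4, hne]

theorem pvGroup3 (ys : List Int) :
    pvGroup 3 ys = (((ys.filter (fun i => decide (27 ≤ i) && decide (i ≤ 33))).map
      (fun t => (PySem.Int.toStr (t - 27 + 1)).toList))).flatten := by
  have hf : ys.filter (fun t => decide (0 ≤ t) && decide (t ≤ 33) && decide (pvSuitOf t = (3:Int)))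
      = ys.filter (fun i => decide (27 ≤ i) && decide (i ≤ 33)) := by
    apply List.filter_congr
    intro t _
    rw [Bool.eq_iff_iff]
    simp only [Bool.and_eq_true, decide_eq_true_eq, pvSuit_eq_iff]
    omega
  unfold pvGroup
  rw [hf]
  congr 1
  apply List.map_congr_left
  intro t ht
  simp only [List.mem_filter, Bool.and_eq_true, decide_eq_true_eq] at ht
  have hs : pvSuitOf t = 3 := by rw [pvSuit_eq_iff]; omega
  have hw : pvWithinOf t = t - 27 := by have := pvWithin_eq hs; omega
  simp [pvDigit, hs, hw]

-- flatten ∘ map with nowhere-empty pieces is empty iff the list is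
theorem pvFlatten_map_nil_iff {α : Type} (l : List α) (f : α → List Char)
    (h : ∀ x ∈ l, f x ≠ []) : ((l.map f).flatten = []) ↔ l = [] := by
  rw [List.flatten_eq_nil_iff]
  constructor
  · intro hh
    cases l with
    | nil => rfl
    | cons a t => exact absurd (hh (f a) (by simp)) (h a (by simp))
  · intro hh; subst hh; simp

theorem pvDigitA0_ne_nil {t : Int} (h0 : 0 ≤ t) (h8 : t ≤ 8) :
    (if t = 4 then ['0'] else (PySem.Int.toStr (t + 1)).toList) ≠ [] := by
  interval_cases t <;> decide

theorem pvDigitA1_ne_nil {t : Int} (h0 : 9 ≤ t) (h8 : t ≤ 17) :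
    (if t = 13 then ['0'] else (PySem.Int.toStr (t - 9 + 1)).toList) ≠ [] := by
  interval_cases t <;> decide

theorem pvDigitA2_ne_nil {t : Int} (h0 : 18 ≤ t) (h8 : t ≤ 26) :
    (if t = 22 then ['0'] else (PySem.Int.toStr (t - 18 + 1)).toList) ≠ [] := by
  interval_cases t <;> decide

theorem pvDigitA3_ne_nil {t : Int} (h0 : 27 ≤ t) (h8 : t ≤ 33) :
    (PySem.Int.toStr (t - 27 + 1)).toList ≠ [] := by
  interval_cases t <;> decide

-- one output chunk: A's guard on the tile list agrees with B's guard on the buffer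
theorem pvChunk_eq (l : List Int) (f : Int → List Char) (c : Char)
    (h : ∀ x ∈ l, f x ≠ []) :
    (if l ≠ [] then (l.map f).flatten ++ [c] else []) =
      (if (l.map f).flatten ≠ [] then (l.map f).flatten ++ [c] else []) := by
  by_cases hl : l = []
  · subst hl; simp
  · have hfl : (l.map f).flatten ≠ [] := fun hh => hl ((pvFlatten_map_nil_iff l f h).mp hh)
    rw [if_pos hl, if_pos hfl]

theorem pvIf_append (c : Prop) [inst : Decidable c] (r g : List Char) (d : Char) :
    (if c then r ++ g ++ [d] else r) = r ++ (if c then g ++ [d] else []) := by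
  split <;> simp

-- reduce B's zip/filter/map/flatten over the literal 4-list to four guarded chunks
theorem pvJoin4 (c0 c1 c2 c3 : List Char) :
    ((([c0, c1, c2, c3].zip ['m', 'p', 's', 'z']).filter (fun bs => bs.1 ≠ [])).map
        (fun bs => bs.1 ++ [bs.2])).flatten =
      (if c0 ≠ [] then c0 ++ ['m'] else []) ++ (if c1 ≠ [] then c1 ++ ['p'] else []) ++
      (if c2 ≠ [] then c2 ++ ['s'] else []) ++ (if c3 ≠ [] then c3 ++ ['z'] else []) := by
  simp only [List.zip, List.zipWith, List.filter_cons, List.filter_nil]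
  split_ifs <;> simp_all

theorem format_tiles_for_display_spec : Claim_equal_format_tiles_for_display := by
  intro xs _
  unfold Spec_format_tiles_for_display format_tiles_for_display format_tiles_for_display_alt
  by_cases hnil : xs = []
  · simp [hnil]
  · simp only [if_neg hnil]
    rw [pvFold_inv]
    rw [pvSorted_filter, pvSorted_filter, pvSorted_filter, pvSorted_filter]
    set ys := PySem.List.sorted xs (fun x => x) false with hys
    simp only [List.nil_append, pvJoin4, pvGroup0, pvGroup1, pvGroup2, pvGroup3]
    simp only [pvIf_append]
    rw [pvChunk_eq _ _ 'm' (fun x hx => pvDigitA0_ne_nil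
          (by simp only [List.mem_filter, Bool.and_eq_true, decide_eq_true_eq] at hx; exact hx.2.1)
          (by simp only [List.mem_filter, Bool.and_eq_true, decide_eq_true_eq] at hx; exact hx.2.2)),
        pvChunk_eq _ _ 'p' (fun x hx => pvDigitA1_ne_nil
          (by simp only [List.mem_filter, Bool.and_eq_true, decide_eq_true_eq] at hx; exact hx.2.1)
          (by simp only [List.mem_filter, Bool.and_eq_true, decide_eq_true_eq] at hx; exact hx.2.2)),
        pvChunk_eq _ _ 's' (fun x hx => pvDigitA2_ne_nil
          (by simp only [List.mem_filter, Bool.and_eq_true, decide_eq_true_eq] at hx; exact hx.2.1)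
          (by simp only [List.mem_filter, Bool.and_eq_true, decide_eq_true_eq] at hx; exact hx.2.2)),
        pvChunk_eq _ _ 'z' (fun x hx => pvDigitA3_ne_nil
          (by simp only [List.mem_filter, Bool.and_eq_true, decide_eq_true_eq] at hx; exact hx.2.1)
          (by simp only [List.mem_filter, Bool.and_eq_true, decide_eq_true_eq] at hx; exact hx.2.2))]
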